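-- pv_equiv track=rewrite | github.com/hhcorzo/Python-Code-Jared | PropagatorExtraction.py | numberOfBasisSets
-- ===== SOURCE A (Python) =====
-- def numberOfBasisSets(logarray):
--     '''returns a list of the split log arrays by basis set. length is number of basis sets'''
--     commandLocation=[]
--     logsToReturn=[]
--     x=0
--     while x < len(logarray):
--         if logarray[x] =='corrections':
--             commandLocation.append(x)
--         x+=1
--     commandLocation.append(len(logarray))
--     x=0
--     logsToReturn.append(logarray[:commandLocation[0]])
--     #the first log in the array is from the start of the file to the first keyword
--     while x< len(commandLocation)-1:
--         b=logarray[commandLocation[x]:commandLocation[x+1]]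
--         logsToReturn.append(b)
--         x+=1
--     return logsToReturn
-- ===== SOURCE B (Python) =====
-- def numberOfBasisSets(logarray):
--     '''returns a list of the split log arrays by basis set. length is number of basis sets'''
--     logsToReturn = []
--     start = 0
--     for x, entry in enumerate(logarray):
--         if entry == 'corrections':
--             logsToReturn.append(logarray[start:x])
--             start = x
--     logsToReturn.append(logarray[start:])
--     return logsToReturn
-- ===== Notes on version B (the rewrite author's own statement) =====
-- stated objective: simpler
-- what changed: Replaces A's two-phase approach (collect all marker indices into a list, then a second indexed loop slicing between consecutive indices) with a single enumerate pass that slices directly whenever a 'corrections' marker is seen, tracking only the previous cut point.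
import Mathlib
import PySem

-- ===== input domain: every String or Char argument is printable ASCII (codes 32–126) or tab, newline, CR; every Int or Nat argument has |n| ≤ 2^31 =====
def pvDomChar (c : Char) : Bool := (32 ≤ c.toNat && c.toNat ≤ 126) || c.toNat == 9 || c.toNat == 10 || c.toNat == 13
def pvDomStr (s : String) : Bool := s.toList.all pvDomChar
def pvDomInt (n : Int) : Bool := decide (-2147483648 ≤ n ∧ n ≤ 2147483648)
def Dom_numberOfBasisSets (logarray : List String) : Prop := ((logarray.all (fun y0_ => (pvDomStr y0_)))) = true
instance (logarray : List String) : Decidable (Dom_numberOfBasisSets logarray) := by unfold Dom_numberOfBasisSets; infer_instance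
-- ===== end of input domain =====

-- B replaces A's two-phase split (collect all marker indices, then slice between consecutive
-- indices in a second indexed loop) by one enumerate pass slicing at each marker (objective: simpler).

-- ===== PORT A =====
def numberOfBasisSets (logarray : List String) : List (List String) :=
  -- first while loop: collect indices x with logarray[x] == 'corrections'
  let commandLocation : List Int :=
    (PySem.List.pyRange 0 (logarray.length : Int) 1).foldl
      (fun acc x => if PySem.List.pyGetD logarray x "" == "corrections" then acc ++ [x] else acc) []
  -- commandLocation.append(len(logarray))
  let commandLocation := commandLocation ++ [(logarray.length : Int)]
  -- logsToReturn.append(logarray[:commandLocation[0]])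
  let logsToReturn : List (List String) :=
    [PySem.List.slice logarray none (some (PySem.List.pyGetD commandLocation 0 0))]
  -- second while loop over x < len(commandLocation)-1
  (PySem.List.pyRange 0 ((commandLocation.length : Int) - 1) 1).foldl
    (fun acc x =>
      acc ++ [PySem.List.slice logarray (some (PySem.List.pyGetD commandLocation x 0))
                                        (some (PySem.List.pyGetD commandLocation (x + 1) 0))])
    logsToReturn

-- ===== PORT B =====
def numberOfBasisSets_alt (logarray : List String) : List (List String) :=
  let st :=
    (PySem.List.enumerate logarray).foldl
      (fun (st : List (List String) × Int) p =>
        if p.2 == "corrections" then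
          (st.1 ++ [PySem.List.slice logarray (some st.2) (some p.1)], p.1)
        else st)
      ([], 0)
  st.1 ++ [PySem.List.slice logarray (some st.2) none]

-- ===== PRECONDITION & SPEC =====
def Spec_numberOfBasisSets (logarray : List String) (out : List (List String)) : Prop := out = numberOfBasisSets_alt logarray
instance (logarray : List String) (out : List (List String)) : Decidable (Spec_numberOfBasisSets logarray out) := by unfold Spec_numberOfBasisSets; infer_instance

-- ===== CLAIM (what is proved, stated in full; the proofs are below) =====
def Claim_equal_numberOfBasisSets : Prop := ∀ (logarray : List String), Dom_numberOfBasisSets logarray → Spec_numberOfBasisSets logarray (numberOfBasisSets logarray)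

-- ===== LEMMAS AND PROOFS =====

-- marker positions of "corrections" in xs, first position counted as i
def markersFrom (xs : List String) (i : Int) : List Int :=
  match xs with
  | [] => []
  | a :: t => if a == "corrections" then i :: markersFrom t (i + 1) else markersFrom t (i + 1)

-- the common shape of both results: slices of `full` cut at the marker list, starting at s
def splitsFrom (full : List String) (s : Int) : List Int → List (List String)
  | [] => [PySem.List.slice full (some s) none]
  | m :: ms => PySem.List.slice full (some s) (some m) :: splitsFrom full m ms

-- slices of `full` between consecutive entries of a position list
def pairSlices (full : List String) : List Int → List (List String)
  | [] => []
  | [_] => []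
  | a :: b :: t => PySem.List.slice full (some a) (some b) :: pairSlices full (b :: t)

theorem markersFrom_eq (xs : List String) (i : Int) :
    markersFrom xs i =
      ((List.range xs.length).filter (fun k => xs.getD k "" == "corrections")).map
        (fun k : Nat => i + (k : Int)) := by
  induction xs generalizing i with
  | nil => simp [markersFrom]
  | cons a t ih =>
    rw [markersFrom, List.length_cons, List.range_succ_eq_map, List.filter_cons]
    have htail : List.filter (fun k => (a :: t).getD k "" == "corrections")
        (List.map Nat.succ (List.range t.length)) =
        List.map Nat.succ
          (List.filter (fun k => t.getD k "" == "corrections") (List.range t.length)) := by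
      rw [List.filter_map]
      simp [Function.comp_def]
    rw [show ((a :: t).getD 0 "") = a from rfl, htail]
    by_cases h : a == "corrections"
    · rw [if_pos h, if_pos h, List.map_cons, List.map_map, ih (i + 1)]
      refine List.cons_eq_cons.mpr ⟨by simp, ?_⟩
      apply List.map_congr_left
      intro k _
      simp
      ring
    · rw [if_neg h, if_neg h, List.map_map, ih (i + 1)]
      apply List.map_congr_left
      intro k _
      simp
      ring

theorem markersFrom_nonneg (xs : List String) (i : Int) (hi : 0 ≤ i) :
    ∀ m ∈ markersFrom xs i, 0 ≤ m := by
  induction xs generalizing i with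
  | nil => simp [markersFrom]
  | cons a t ih =>
    intro m hm
    simp only [markersFrom] at hm
    by_cases h : a == "corrections"
    · simp [h] at hm
      rcases hm with rfl | hm
      · exact hi
      · exact ih (i + 1) (by omega) m hm
    · simp [h] at hm
      exact ih (i + 1) (by omega) m hm

theorem range_map_pairs (full : List String) (l : List Int) :
    (List.range (l.length - 1)).map
        (fun k => PySem.List.slice full (some (l.getD k 0)) (some (l.getD (k + 1) 0)))
      = pairSlices full l := by
  induction l with
  | nil => simp [pairSlices]
  | cons a t ih =>
    cases t with
    | nil => simp [pairSlices]
    | cons b t' =>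
      simp only [List.length_cons, Nat.add_sub_cancel, List.range_succ_eq_map, List.map_cons,
        List.map_map, pairSlices]
      refine List.cons_eq_cons.mpr ⟨by simp, ?_⟩
      rw [← ih]
      simp only [List.length_cons, Nat.add_sub_cancel]
      apply List.map_congr_left
      intro k _
      simp

theorem slice_to_len (full : List String) (s : Int) (hs : 0 ≤ s) :
    PySem.List.slice full (some s) (some (full.length : Int)) =
      PySem.List.slice full (some s) none := by
  rw [PySem.List.slice_toNat full hs (by positivity), PySem.List.slice_from full hs]
  apply List.take_of_length_le
  simp

theorem chain_eq_splits (full : List String) (ms : List Int) (s : Int)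
    (hs : 0 ≤ s) (hms : ∀ m ∈ ms, 0 ≤ m) :
    PySem.List.slice full (some s) (some ((ms ++ [(full.length : Int)]).headD 0)) ::
        pairSlices full (ms ++ [(full.length : Int)])
      = splitsFrom full s ms := by
  induction ms generalizing s with
  | nil => simp [pairSlices, splitsFrom, slice_to_len full s hs]
  | cons m ms' ih =>
    have hm : 0 ≤ m := hms m (by simp)
    have step : pairSlices full (m :: (ms' ++ [(full.length : Int)])) =
        PySem.List.slice full (some m) (some ((ms' ++ [(full.length : Int)]).headD 0)) ::
          pairSlices full (ms' ++ [(full.length : Int)]) := by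
      cases ms' <;> simp [pairSlices]
    simp only [List.cons_append, step, splitsFrom]
    rw [ih m hm (fun x hx => hms x (by simp [hx]))]
    simp

theorem portA_eq_splits (xs : List String) :
    numberOfBasisSets xs = splitsFrom xs 0 (markersFrom xs 0) := by
  unfold numberOfBasisSets
  rw [PySem.List.foldl_append_if_eq_filter, PySem.List.foldl_append_singleton_eq_map]
  simp only [List.nil_append]
  set M := (PySem.List.pyRange 0 (xs.length : Int) 1).filter
      (fun x => PySem.List.pyGetD xs x "" == "corrections") with hM
  have hMcast : M = ((List.range xs.length).filter (fun k => xs.getD k "" == "corrections")).map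
      (fun k : Nat => (k : Int)) := by
    rw [hM, PySem.List.pyRange_one]
    rw [List.filter_map]
    simp [Function.comp_def, PySem.List.pyGetD_natCast]
  have hMm : markersFrom xs 0 = M := by
    rw [markersFrom_eq, hMcast]; simp
  -- first element
  have hfirst : PySem.List.pyGetD (M ++ [(xs.length : Int)]) 0 0 =
      (M ++ [(xs.length : Int)]).headD 0 := by
    rw [show ((0 : Int)) = ((0 : Nat) : Int) by simp, PySem.List.pyGetD_natCast]
    cases M ++ [(xs.length : Int)] with
    | nil => simp
    | cons a t => simp
  -- second loop
  have hlen : (((M ++ [(xs.length : Int)]).length : Int) - 1 : Int) =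
      (((M ++ [(xs.length : Int)]).length - 1 : Nat) : Int) := by
    simp
  have hmap : (PySem.List.pyRange 0 (((M ++ [(xs.length : Int)]).length : Int) - 1) 1).map
      (fun x => PySem.List.slice xs (some (PySem.List.pyGetD (M ++ [(xs.length : Int)]) x 0))
                                    (some (PySem.List.pyGetD (M ++ [(xs.length : Int)]) (x + 1) 0)))
      = pairSlices xs (M ++ [(xs.length : Int)]) := by
    rw [hlen, PySem.List.pyRange_one]
    rw [List.map_map]
    rw [← range_map_pairs xs (M ++ [(xs.length : Int)])]
    simp only [Int.sub_zero, Int.toNat_natCast]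
    apply List.map_congr_left
    intro k _
    simp only [Function.comp_def, zero_add]
    rw [PySem.List.pyGetD_natCast]
    rw [show ((k : Int) + 1) = (((k + 1 : Nat)) : Int) by push_cast; ring,
      PySem.List.pyGetD_natCast]
  rw [hmap, hfirst, ← hMm]
  exact chain_eq_splits xs (markersFrom xs 0) 0 le_rfl
    (markersFrom_nonneg xs 0 le_rfl)

theorem portB_inv (full : List String) :
    ∀ (tail : List String) (i : Int) (res : List (List String)) (s : Int),
    (let st := (PySem.List.enumerate tail i).foldl
        (fun (st : List (List String) × Int) p =>
          if p.2 == "corrections" then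
            (st.1 ++ [PySem.List.slice full (some st.2) (some p.1)], p.1)
          else st)
        (res, s)
     st.1 ++ [PySem.List.slice full (some st.2) none])
      = res ++ splitsFrom full s (markersFrom tail i) := by
  intro tail
  induction tail with
  | nil => intro i res s; simp [PySem.List.enumerate_nil, markersFrom, splitsFrom]
  | cons a t ih =>
    intro i res s
    rw [PySem.List.enumerate_cons]
    by_cases h : a == "corrections"
    · rw [List.foldl_cons,
        show (if ((i, a).2 == "corrections") = true then
              ((res, s).1 ++ [PySem.List.slice full (some (res, s).2) (some (i, a).1)], (i, a).1)
            else (res, s))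
          = (res ++ [PySem.List.slice full (some s) (some i)], i) from by simp [h]]
      rw [show markersFrom (a :: t) i = i :: markersFrom t (i + 1) from by
        simp [markersFrom, h]]
      rw [ih (i + 1) (res ++ [PySem.List.slice full (some s) (some i)]) i]
      simp [splitsFrom]
    · rw [List.foldl_cons,
        show (if ((i, a).2 == "corrections") = true then
              ((res, s).1 ++ [PySem.List.slice full (some (res, s).2) (some (i, a).1)], (i, a).1)
            else (res, s))
          = (res, s) from by simp [h]]
      rw [show markersFrom (a :: t) i = markersFrom t (i + 1) from by
        simp [markersFrom, h]]
      exact ih (i + 1) res s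

theorem portB_eq_splits (xs : List String) :
    numberOfBasisSets_alt xs = splitsFrom xs 0 (markersFrom xs 0) := by
  unfold numberOfBasisSets_alt
  have h := portB_inv xs xs 0 [] 0
  simp only [List.nil_append] at h
  exact h

-- ===== VERDICT (by name: the statement is the Claim_ definition above) =====
theorem numberOfBasisSets_spec : Claim_equal_numberOfBasisSets := by
  intro logarray _
  unfold Spec_numberOfBasisSets
  rw [portA_eq_splits, portB_eq_splits]
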